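-- pv_equiv track=rewrite | github.com/BaileyU03/AdventOfCode2024 | day05.py | greater_than
-- ===== SOURCE A (Python) =====
-- def greater_than(a, b, rules):
--     index_must_be_first = [j for j in range(len(rules[0])) if rules[0][j] == b]
--     for index in index_must_be_first:
--         if a == rules[1][index]:
--             return True
--     index_must_be_second = [j for j in range(len(rules[1])) if rules[0][j] == a]
--     for index in index_must_be_second:
--         if b == rules[0][index]:
--             return True
--     return False
-- ===== SOURCE B (Python) =====
-- def greater_than(a, b, rules):
--     successors = {}
--     for x, y in zip(rules[0], rules[1]):
--         successors.setdefault(x, set()).add(y)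
--     return a in successors.get(b, set())
-- ===== Notes on version B (the rewrite author's own statement) =====
-- stated objective: idiomatic
-- what changed: B builds an adjacency map (dict page -> set of successor pages) from the zipped rule columns and answers with one lookup, instead of A's two index-comprehension scans; Pre_ excludes the inputs where A raises IndexError (fewer than two rule rows, or an over-indexed row).
-- intended difference: When a == b, a occurs among the first len(rules[1]) entries of rules[0], and no (a,a) rule exists, A returns True because its second loop compares b against rules[0][index] instead of rules[1][index] (a slip that can only fire when a == b); B returns False, the intended answer, since no rule orders a page before itself. — e.g. on greater_than(1, 1, [[1, 2], [2, 3]]): A returns true, B returns false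
import Mathlib
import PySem

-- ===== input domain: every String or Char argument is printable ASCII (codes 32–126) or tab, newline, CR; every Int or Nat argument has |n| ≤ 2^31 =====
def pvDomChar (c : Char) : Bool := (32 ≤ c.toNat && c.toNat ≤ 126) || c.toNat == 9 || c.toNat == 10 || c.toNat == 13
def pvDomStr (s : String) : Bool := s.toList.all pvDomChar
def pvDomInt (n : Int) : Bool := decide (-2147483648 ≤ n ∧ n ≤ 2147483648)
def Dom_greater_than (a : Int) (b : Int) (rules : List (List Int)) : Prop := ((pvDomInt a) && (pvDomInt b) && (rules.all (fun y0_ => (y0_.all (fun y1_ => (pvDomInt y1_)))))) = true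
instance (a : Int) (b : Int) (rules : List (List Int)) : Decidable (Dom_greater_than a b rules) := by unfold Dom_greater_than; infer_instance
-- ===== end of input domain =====

-- B builds an adjacency map (page -> set of successor pages) from the zipped rule
-- columns and answers with one lookup (idiomatic; no speed claim); B drops A's dead
-- second loop, so they differ on the D_ corner below.

-- ===== PORT A =====
def greater_than (a : Int) (b : Int) (rules : List (List Int)) : Bool :=
  if ((PySem.List.pyRange 0 ((PySem.List.pyGetD rules 0 []).length : Int) 1).filter
        (fun j => PySem.List.pyGetD (PySem.List.pyGetD rules 0 []) j 0 == b)).any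
        (fun index => a == PySem.List.pyGetD (PySem.List.pyGetD rules 1 []) index 0) then true
  else
    ((PySem.List.pyRange 0 ((PySem.List.pyGetD rules 1 []).length : Int) 1).filter
        (fun j => PySem.List.pyGetD (PySem.List.pyGetD rules 0 []) j 0 == a)).any
        (fun index => b == PySem.List.pyGetD (PySem.List.pyGetD rules 0 []) index 0)

-- ===== PORT B =====
-- successors.setdefault(x, set()).add(y)  =  modify x ∅ (·.add y)
def greater_than_alt (a : Int) (b : Int) (rules : List (List Int)) : Bool :=
  let successors : PySem.Dict Int (PySem.Set Int) :=
    ((PySem.List.pyGetD rules 0 []).zip (PySem.List.pyGetD rules 1 [])).foldl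
      (fun d p => d.modify p.1 PySem.Set.empty (fun s => s.add p.2)) PySem.Dict.empty
  (successors.getD b PySem.Set.empty).contains a

-- ===== PRECONDITION & SPEC =====
-- Pre_ excludes exactly the inputs where the Python A raises an IndexError: fewer than two
-- rule rows, or an occurrence of b in rules[0] at an index where rules[1] is too short to be
-- read (reached because no earlier zipped pair gives an early True), or rules[1] longer than
-- rules[0] so that the second comprehension over-indexes rules[0].
def Pre_greater_than (a : Int) (b : Int) (rules : List (List Int)) : Prop :=
  2 ≤ rules.length ∧
  ((b, a) ∈ (rules.getD 0 []).zip (rules.getD 1 []) ∨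
   ((rules.getD 1 []).length ≤ (rules.getD 0 []).length ∧
    b ∉ (rules.getD 0 []).drop (rules.getD 1 []).length))
instance (a : Int) (b : Int) (rules : List (List Int)) : Decidable (Pre_greater_than a b rules) := by unfold Pre_greater_than; infer_instance

def pvWitness_greater_than : Int × Int × List (List Int) := (1, 2, [[2], [1]])

-- When a == b, a occurs among the first len(rules[1]) entries of rules[0], and no (a,a) rule
-- exists, A returns True because its second loop compares b against rules[0][index] instead of
-- rules[1][index] (a slip that can only fire when a == b); B returns False, the intended
-- answer, since no rule orders a page before itself.
def D_greater_than (a : Int) (b : Int) (rules : List (List Int)) : Prop :=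
  a = b ∧ a ∈ (rules.getD 0 []).take (rules.getD 1 []).length ∧
  (a, a) ∉ (rules.getD 0 []).zip (rules.getD 1 [])
instance (a : Int) (b : Int) (rules : List (List Int)) : Decidable (D_greater_than a b rules) := by unfold D_greater_than; infer_instance

def Spec_greater_than (a : Int) (b : Int) (rules : List (List Int)) (out : Bool) : Prop := ¬ D_greater_than a b rules → out = greater_than_alt a b rules
instance (a : Int) (b : Int) (rules : List (List Int)) (out : Bool) : Decidable (Spec_greater_than a b rules out) := by unfold Spec_greater_than; infer_instance

def pvDiffWitness_greater_than : Int × Int × List (List Int) := (1, 1, [[1, 2], [2, 3]])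
def pvDiffWitnessOut_greater_than : Bool × Bool := (true, false)

-- ===== CLAIM (what is proved, stated in full; the proofs are below) =====
def Claim_unchanged_greater_than : Prop := ∀ (a : Int) (b : Int) (rules : List (List Int)), Dom_greater_than a b rules → Pre_greater_than a b rules → Spec_greater_than a b rules (greater_than a b rules)
def Claim_changed_greater_than : Prop := Dom_greater_than (pvDiffWitness_greater_than.1) (pvDiffWitness_greater_than.2.1) (pvDiffWitness_greater_than.2.2) ∧ Pre_greater_than (pvDiffWitness_greater_than.1) (pvDiffWitness_greater_than.2.1) (pvDiffWitness_greater_than.2.2) ∧ D_greater_than (pvDiffWitness_greater_than.1) (pvDiffWitness_greater_than.2.1) (pvDiffWitness_greater_than.2.2) ∧ greater_than (pvDiffWitness_greater_than.1) (pvDiffWitness_greater_than.2.1) (pvDiffWitness_greater_than.2.2) = pvDiffWitnessOut_greater_than.1 ∧ greater_than_alt (pvDiffWitness_greater_than.1) (pvDiffWitness_greater_than.2.1) (pvDiffWitness_greater_than.2.2) = pvDiffWitnessOut_greater_than.2 ∧ pvDiffWitnessOut_greater_than.1 ≠ pvDiffWitnessOut_greater_than.2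
def Claim_exact_greater_than : Prop := ∀ (a : Int) (b : Int) (rules : List (List Int)), Dom_greater_than a b rules → Pre_greater_than a b rules → D_greater_than a b rules → greater_than a b rules ≠ greater_than_alt a b rules

-- ===== LEMMAS AND PROOFS =====

theorem pv_mem_zip_iff (l1 l2 : List Int) (x y : Int) :
    (x, y) ∈ l1.zip l2 ↔ ∃ i, ∃ _ : i < l1.length, ∃ _ : i < l2.length, l1[i] = x ∧ l2[i] = y := by
  rw [List.mem_iff_getElem]
  constructor
  · rintro ⟨i, hi, h⟩
    rw [List.length_zip] at hi
    refine ⟨i, by omega, by omega, ?_⟩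
    rw [List.getElem_zip] at h
    exact ⟨congrArg Prod.fst h, congrArg Prod.snd h⟩
  · rintro ⟨i, h1, h2, hx, hy⟩
    exact ⟨i, by rw [List.length_zip]; omega, by rw [List.getElem_zip]; simp [hx, hy]⟩

-- A's first loop succeeds iff (b, a) is a zipped pair, provided no out-of-range read occurs.
theorem pv_first_any (a b : Int) (r0 r1 : List Int)
    (h : (b, a) ∈ r0.zip r1 ∨ (r1.length ≤ r0.length ∧ b ∉ r0.drop r1.length)) :
    (((PySem.List.pyRange 0 (r0.length : Int) 1).filter
        (fun j => PySem.List.pyGetD r0 j 0 == b)).any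
        (fun index => a == PySem.List.pyGetD r1 index 0)) =
    ((r0.zip r1).contains (b, a)) := by
  rw [List.any_filter]
  by_cases hz : (b, a) ∈ r0.zip r1
  · simp only [List.contains_eq_mem, hz, decide_true]
    rw [pv_mem_zip_iff] at hz
    obtain ⟨i, h1, h2, hx, hy⟩ := hz
    rw [List.any_eq_true]
    refine ⟨(i : Int), ?_, ?_⟩
    · rw [PySem.List.mem_pyRange_one]; constructor <;> [positivity; exact_mod_cast h1]
    · simp [PySem.List.pyGetD_natCast, List.getD_eq_getElem?_getD, h1, h2, hx, hy]
  · simp only [List.contains_eq_mem, hz, decide_false]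
    rcases h with h | h
    · exact absurd h hz
    · obtain ⟨hle, hnb⟩ := h
      rw [List.any_eq_false]
      rintro j hj
      rw [PySem.List.mem_pyRange_one] at hj
      obtain ⟨hj0, hjn⟩ := hj
      lift j to ℕ using hj0 with k
      have hkn : k < r0.length := by exact_mod_cast hjn
      simp only [PySem.List.pyGetD_natCast, List.getD_eq_getElem?_getD]
      by_cases hk1 : k < r1.length
      · simp only [List.getElem?_eq_getElem hkn, List.getElem?_eq_getElem hk1, Option.getD_some]
        intro hcon
        rw [Bool.and_eq_true, beq_iff_eq, beq_iff_eq] at hcon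
        exact hz ((pv_mem_zip_iff r0 r1 b a).mpr ⟨k, hkn, hk1, hcon.1, hcon.2.symm⟩)
      · intro hcon
        rw [Bool.and_eq_true, beq_iff_eq] at hcon
        apply hnb
        rw [List.getElem?_eq_getElem hkn, Option.getD_some] at hcon
        rw [← hcon.1]
        rw [List.mem_iff_getElem]
        exact ⟨k - r1.length, by rw [List.length_drop]; omega,
          by rw [List.getElem_drop]; congr 1; omega⟩

-- A's second loop (its guard forces b = rules[0][index] = a): true iff a = b and a occurs
-- among the first len r1 entries of r0 (given no over-indexing).
theorem pv_second_any (a b : Int) (r0 r1 : List Int) (hle : r1.length ≤ r0.length) :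
    (((PySem.List.pyRange 0 (r1.length : Int) 1).filter
        (fun j => PySem.List.pyGetD r0 j 0 == a)).any
        (fun index => b == PySem.List.pyGetD r0 index 0)) =
    (decide (a = b) && decide (a ∈ r0.take r1.length)) := by
  rw [List.any_filter, Bool.eq_iff_iff]
  constructor
  · intro h
    obtain ⟨j, hj, hcon⟩ := List.any_eq_true.mp h
    rw [PySem.List.mem_pyRange_one] at hj
    lift j to ℕ using hj.1 with k
    have hk1 : k < r1.length := by exact_mod_cast hj.2
    have hk0 : k < r0.length := by omega
    rw [Bool.and_eq_true, beq_iff_eq, beq_iff_eq] at hcon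
    have hg : PySem.List.pyGetD r0 (k : Int) 0 = r0[k] := by
      simp [PySem.List.pyGetD_natCast, List.getD_eq_getElem?_getD, List.getElem?_eq_getElem hk0]
    rw [hg] at hcon
    have hm : a ∈ r0.take r1.length := by
      rw [List.mem_iff_getElem]
      exact ⟨k, by rw [List.length_take]; omega, by rw [List.getElem_take]; exact hcon.1⟩
    simp [hcon.2.trans hcon.1, hm]
  · intro h
    rw [Bool.and_eq_true, decide_eq_true_eq, decide_eq_true_eq] at h
    obtain ⟨hab, hm⟩ := h
    rw [List.mem_iff_getElem] at hm
    obtain ⟨k, hk, hv⟩ := hm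
    rw [List.length_take] at hk
    have hk1 : k < r1.length := by omega
    have hk0 : k < r0.length := by omega
    rw [List.getElem_take] at hv
    rw [List.any_eq_true]
    refine ⟨(k : Int), ?_, ?_⟩
    · rw [PySem.List.mem_pyRange_one]; constructor <;> [positivity; exact_mod_cast hk1]
    · have hg : PySem.List.pyGetD r0 (k : Int) 0 = r0[k] := by
        simp [PySem.List.pyGetD_natCast, List.getD_eq_getElem?_getD, List.getElem?_eq_getElem hk0]
      simp [hg, hv, hab]

-- The adjacency-map fold: a is a recorded successor of b iff (b, a) was folded in.
theorem pv_adj_contains (l : List (Int × Int)) (d : PySem.Dict Int (PySem.Set Int)) (b a : Int) :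
    (((l.foldl (fun d p => d.modify p.1 PySem.Set.empty (fun s => s.add p.2)) d).getD b
        PySem.Set.empty).contains a) =
    (((d.getD b PySem.Set.empty).contains a) || l.contains (b, a)) := by
  induction l generalizing d with
  | nil => simp
  | cons p t ih =>
    rcases p with ⟨x, y⟩
    simp only [List.foldl_cons, ih, PySem.Dict.getD_modify, List.contains_cons]
    by_cases h : b = x
    · subst h
      rw [if_pos rfl]
      have hadd : (((d.getD b PySem.Set.empty).add y).contains a) =
          (((d.getD b PySem.Set.empty).contains a) || (a == y)) := by
        simp only [PySem.Set.contains]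
        apply Bool.eq_iff_iff.mpr
        simp [PySem.Set.mem_add]
      have hbeq : ((b, a) == (b, y)) = (a == y) := by
        simp [Prod.mk.injEq]
      rw [hadd, hbeq, Bool.or_assoc, Bool.or_comm (a == y), ← Bool.or_assoc]
    · rw [if_neg h]
      have hbeq : ((b, a) == (x, y)) = false := by
        simp [Prod.mk.injEq]; intro hc; exact absurd hc h
      rw [hbeq, Bool.false_or]

-- B equals membership of (b, a) among the zipped rule pairs.
theorem pv_alt_eq (a b : Int) (rules : List (List Int)) :
    greater_than_alt a b rules =
    (((rules.getD 0 []).zip (rules.getD 1 [])).contains (b, a)) := by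
  have h0 : PySem.List.pyGetD rules 0 [] = rules.getD 0 [] := by
    simpa using PySem.List.pyGetD_natCast (n := 0) (xs := rules) (d := [])
  have h1 : PySem.List.pyGetD rules 1 [] = rules.getD 1 [] := by
    simpa using PySem.List.pyGetD_natCast (n := 1) (xs := rules) (d := [])
  unfold greater_than_alt
  rw [h0, h1, pv_adj_contains]
  simp [PySem.Set.contains]

theorem pv_A_eq (a b : Int) (rules : List (List Int)) (hpre : Pre_greater_than a b rules) :
    greater_than a b rules =
    ((((rules.getD 0 []).zip (rules.getD 1 [])).contains (b, a)) ||
      (decide (a = b) && decide (a ∈ (rules.getD 0 []).take (rules.getD 1 []).length))) := by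
  obtain ⟨_, hpre⟩ := hpre
  have h0 : PySem.List.pyGetD rules 0 [] = rules.getD 0 [] := by
    simpa using PySem.List.pyGetD_natCast (n := 0) (xs := rules) (d := [])
  have h1 : PySem.List.pyGetD rules 1 [] = rules.getD 1 [] := by
    simpa using PySem.List.pyGetD_natCast (n := 1) (xs := rules) (d := [])
  unfold greater_than
  rw [h0, h1]
  set r0 := rules.getD 0 [] with hr0
  set r1 := rules.getD 1 [] with hr1
  rw [pv_first_any a b r0 r1 hpre]
  by_cases hz : (b, a) ∈ r0.zip r1
  · simp [hz, List.contains_eq_mem]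
  · have hle : r1.length ≤ r0.length := by
      rcases hpre with h | h
      · exact absurd h hz
      · exact h.1
    rw [pv_second_any a b r0 r1 hle]
    simp [hz, List.contains_eq_mem]

-- ===== VERDICT (by name: the statements are the Claim_ definitions above) =====
theorem greater_than_spec : Claim_unchanged_greater_than := by
  intro a b rules _ hpre hnd
  rw [pv_alt_eq, pv_A_eq a b rules hpre]
  by_cases hz : (b, a) ∈ (rules.getD 0 []).zip (rules.getD 1 [])
  · rw [List.contains_eq_mem, decide_eq_true hz, Bool.true_or]
  · rw [List.contains_eq_mem, decide_eq_false hz, Bool.false_or]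
    unfold D_greater_than at hnd
    by_cases hab : a = b
    · subst hab
      by_cases hm : a ∈ (rules.getD 0 []).take (rules.getD 1 []).length
      · exact absurd ⟨rfl, hm, hz⟩ hnd
      · rw [decide_eq_false hm, Bool.and_false]
    · rw [decide_eq_false hab, Bool.false_and]

theorem greater_than_changed : Claim_changed_greater_than := by
  unfold Claim_changed_greater_than; decide

theorem greater_than_tight : Claim_exact_greater_than := by
  intro a b rules _ hpre hd
  obtain ⟨hab, hm, hz⟩ := hd
  subst hab
  rw [pv_alt_eq, pv_A_eq a a rules hpre]
  rw [List.contains_eq_mem, decide_eq_false hz, Bool.false_or,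
    decide_eq_true (rfl : a = a), Bool.true_and, decide_eq_true hm]
  simp
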